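-- pv_equiv track=rewrite | github.com/elice-02-study-01-algorithm/python | HJ_Seo/programmers/2022_toss_next/02_failed_.py | solution
-- ===== SOURCE A (Python) =====
-- def solution(arr):
--     def check_pal(lst):
--         if len(lst) == 1 or lst != lst[::-1]:
--             return False
--
--         return True
--
--     def check_add_pal(arr,isTrue):
--         if len(arr) == 1:
--             return False
--         elif isTrue == True:
--             return True
--         elif isTrue == False:
--             if check_pal(arr):
--                 return True
--
--         leng = len(arr)
--         for i in range(leng-1):
--             tmp = arr[:i] + [arr[i]+arr[i+1]] + arr[i+2:]
--             if check_add_pal(tmp,isTrue):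
--                 return True
--
--         return False
--
--     answer = 0
--     leng = len(arr)
--     for i in range(leng-1):
--         for j in range(i+2,leng+1):
--             tmp = arr[i:j]
--             isTrue = False
--             if check_add_pal(tmp,isTrue):
--                 answer += 1
--
--     return answer
-- ===== SOURCE B (Python) =====
-- def solution(arr):
--     # For each start i, scan growing prefixes of arr[i:]: a subarray is mergeable to a
--     # length>=2 palindrome iff two (not nec. distinct) interior prefix sums add up to
--     # its total; maintain the set of such pair sums incrementally.
--     n = len(arr)
--     ans = 0
--     for i in range(n):
--         sums = [0]
--         pairset = set()
--         for x in arr[i:]: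
--             last = sums[-1]
--             if len(sums) >= 2:
--                 for b in sums[1:]:
--                     pairset.add(last + b)
--             cur = last + x
--             sums.append(cur)
--             if len(sums) >= 3 and cur in pairset:
--                 ans += 1
--     return ans
-- ===== Notes on version B (the rewrite author's own statement) =====
-- stated objective: faster
-- what changed: A tests each subarray by exhaustively recursing over all adjacent-merge sequences looking for a palindrome; B uses the characterization that a subarray is reducible to a length>=2 palindrome iff two (not necessarily distinct) interior prefix sums add up to its total, maintaining the set of pairwise prefix-sum sums incrementally per start index. (intended as faster; a timing run measured A timing out already at n=16 where B answered instantly, so no ratio at a common largest size could be read)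
import Mathlib
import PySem

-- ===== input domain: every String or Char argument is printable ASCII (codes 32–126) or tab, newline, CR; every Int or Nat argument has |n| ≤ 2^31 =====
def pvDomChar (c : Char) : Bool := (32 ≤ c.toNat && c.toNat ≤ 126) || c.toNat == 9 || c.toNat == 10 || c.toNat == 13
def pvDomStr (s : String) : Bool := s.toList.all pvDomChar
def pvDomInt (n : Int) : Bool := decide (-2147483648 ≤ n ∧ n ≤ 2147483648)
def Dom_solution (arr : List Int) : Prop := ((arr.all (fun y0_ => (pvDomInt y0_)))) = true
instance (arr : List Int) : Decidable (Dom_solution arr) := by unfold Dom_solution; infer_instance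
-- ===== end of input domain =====

-- B replaces A's exponential merge recursion by a prefix-sum pair test maintained with a set
-- (objective: faster — intended asymptotic gain; a timing run saw A time out at n=16 where B
-- returned, so no ratio could be measured). Neither program mutates its input.

-- ===== PORT A =====
-- check_pal: lst[::-1] is lst.reverse (PySem.List.slice?_none_none_neg_one)
def checkPal (lst : List Int) : Bool :=
  if lst.length == 1 || lst != lst.reverse then false else true

-- tmp = arr[:i] + [arr[i]+arr[i+1]] + arr[i+2:]  for i ∈ range(len-1): nonnegative in-range
-- indices, so the slices are take/drop (PySem.List.slice_to_natCast / slice_from_natCast)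
def mergeAt (arr : List Int) (i : Nat) : List Int :=
  arr.take i ++ [arr.getD i 0 + arr.getD (i + 1) 0] ++ arr.drop (i + 2)

theorem length_mergeAt (arr : List Int) (i : Nat) (h : i + 1 < arr.length) :
    (mergeAt arr i).length = arr.length - 1 := by
  simp [mergeAt]; omega

def checkAddPal (arr : List Int) (isTrue : Bool) : Bool :=
  if arr.length == 1 then false
  else if isTrue then true
  else if checkPal arr then true  -- isTrue is false in this branch, so the `elif isTrue == False` body runs
  else (List.range (arr.length - 1)).attach.any fun ⟨i, hi⟩ =>
    checkAddPal (mergeAt arr i) isTrue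
termination_by arr.length
decreasing_by
  have hi' := List.mem_range.mp hi
  rw [length_mergeAt arr i (by omega)]
  omega

def solution (arr : List Int) : Int :=
  let leng : Int := arr.length
  (PySem.List.pyRange 0 (leng - 1) 1).foldl (fun answer i =>
      (PySem.List.pyRange (i + 2) (leng + 1) 1).foldl (fun answer j =>
          if checkAddPal (PySem.List.slice arr (some i) (some j)) false then answer + 1
          else answer)
        answer)
    0

-- ===== PORT B =====
-- one iteration of Source B's inner loop; state = (sums, pairset, ans)
def bStep (st : List Int × PySem.Set Int × Int) (x : Int) : List Int × PySem.Set Int × Int :=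
  let sums := st.1
  let pairset := st.2.1
  let ans := st.2.2
  let last := (PySem.List.pyGet? sums (-1)).getD 0      -- sums[-1]; sums is never empty
  let pairset := if 2 ≤ sums.length then
      (sums.drop 1).foldl (fun s b => PySem.Set.add s (last + b)) pairset   -- sums[1:]
    else pairset
  let cur := last + x
  let sums := sums ++ [cur]
  let ans := if 3 ≤ sums.length ∧ cur ∈ pairset then ans + 1 else ans
  (sums, pairset, ans)

def solution_alt (arr : List Int) : Int :=
  let n := arr.length
  (List.range n).foldl (fun ans i =>
      ((arr.drop i).foldl bStep ([0], PySem.Set.empty, ans)).2.2)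
    0

-- ===== PRECONDITION & SPEC =====
def Spec_solution (arr : List Int) (out : Int) : Prop := out = solution_alt arr
instance (arr : List Int) (out : Int) : Decidable (Spec_solution arr out) := by unfold Spec_solution; infer_instance

-- ===== CLAIM (what is proved, stated in full; the proofs are below) =====
def Claim_equal_solution : Prop := ∀ (arr : List Int), Dom_solution arr → Spec_solution arr (solution arr)

-- ===== LEMMAS AND PROOFS =====

def psum (l : List Int) (k : Nat) : Int := (l.take k).sum

theorem psum_full (l : List Int) : psum l l.length = l.sum := by simp [psum]

theorem psum_of_le_length {l : List Int} {k : Nat} (h : l.length ≤ k) : psum l k = l.sum := by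
  simp [psum, List.take_of_length_le h]

theorem psum_append_of_le {p : List Int} (q : List Int) {k : Nat} (h : k ≤ p.length) :
    psum (p ++ q) k = psum p k := by
  simp [psum, List.take_append_of_le_length h]

theorem psum_succ {l : List Int} {k : Nat} (h : k < l.length) :
    psum l (k + 1) = psum l k + l.getD k 0 := by
  rw [psum, List.take_add_one, List.sum_append]
  simp [psum, List.getD, List.getElem?_eq_getElem h]

theorem psum_mergeAt_le {l : List Int} {i : Nat} (k : Nat) (hk : k ≤ i) (hi : i + 1 < l.length) :
    psum (mergeAt l i) k = psum l k := by
  rw [mergeAt, List.append_assoc, psum_append_of_le _ (by simp; omega)]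
  simp [psum, List.take_take, Nat.min_eq_left hk]

theorem psum_mergeAt_gt {l : List Int} {i : Nat} (k : Nat) (hk : i < k) (hi : i + 1 < l.length) :
    psum (mergeAt l i) k = psum l (k + 1) := by
  have h2 : i + 2 ≤ l.length := by omega
  -- left side
  rw [mergeAt, List.append_assoc, psum, List.take_append, List.sum_append]
  have hlen : (l.take i).length = i := by simp; omega
  rw [List.take_of_length_le (by omega : (l.take i).length ≤ k)]
  rw [hlen]
  have hk1 : 1 ≤ k - i := by omega
  rw [show k - i = 1 + (k - i - 1) by omega, List.take_append, List.sum_append]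
  rw [List.take_of_length_le (by simp : ([ l.getD i 0 + l.getD (i+1) 0 ]).length ≤ 1 + (k - i - 1))]
  rw [show 1 + (k - i - 1) - ([l.getD i 0 + l.getD (i+1) 0]).length = k - i - 1 by simp]
  rw [show k + 1 = (i + 2) + (k - i - 1) by omega, psum, List.take_add, List.sum_append]
  rw [show (List.take (i+2) l).sum = psum l (i + 2) from rfl,
      show i + 2 = (i + 1) + 1 by omega, psum_succ (by omega), psum_succ (by omega)]
  simp [psum]
  ring

theorem sum_mergeAt {l : List Int} {i : Nat} (hi : i + 1 < l.length) :
    (mergeAt l i).sum = l.sum := by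
  have h1 := psum_mergeAt_gt (l := l) (i := i) (l.length - 1) (by omega) hi
  rw [show l.length - 1 + 1 = l.length by omega, psum_full] at h1
  rw [← h1, psum_of_le_length (by rw [length_mergeAt _ _ hi])]

theorem checkPal_iff (l : List Int) : checkPal l = true ↔ l.length ≠ 1 ∧ l = l.reverse := by
  simp [checkPal, and_comm]

def GoodP (l : List Int) : Prop :=
  ∃ a b : Nat, 1 ≤ a ∧ a ≤ b ∧ b + 1 ≤ l.length ∧ psum l a + psum l b = l.sum

theorem pal_good {l : List Int} (h2 : 2 ≤ l.length) (hpal : l = l.reverse) : GoodP l := by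
  have h0 : l.getD 0 0 = l.getD (l.length - 1) 0 := by
    conv_lhs => rw [hpal]
    simp only [List.getD]
    rw [List.getElem?_reverse (by omega)]
    simp
  refine ⟨1, l.length - 1, le_refl _, by omega, by omega, ?_⟩
  have hs1 : psum l 1 = l.getD 0 0 := by
    have := psum_succ (l := l) (k := 0) (by omega); simpa [psum] using this
  have hs2 : psum l (l.length - 1 + 1) = psum l (l.length - 1) + l.getD (l.length - 1) 0 :=
    psum_succ (by omega)
  rw [show l.length - 1 + 1 = l.length by omega, psum_full] at hs2
  rw [hs1, h0]
  omega

theorem checkAddPal_false_eq (l : List Int) :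
    checkAddPal l false =
      (if l.length = 1 then false
       else if checkPal l then true
       else (List.range (l.length - 1)).attach.any fun ⟨i, _⟩ =>
         checkAddPal (mergeAt l i) false) := by
  rw [checkAddPal]
  simp only [beq_iff_eq, Bool.false_eq_true, if_false]

theorem charA_mp : ∀ n (l : List Int), l.length = n → 1 ≤ n →
    checkAddPal l false = true → GoodP l := by
  intro n
  induction n using Nat.strong_induction_on with
  | _ n ih =>
    intro l hlen h1 hA
    rw [checkAddPal_false_eq] at hA
    by_cases hl1 : l.length = 1
    · rw [if_pos hl1] at hA; exact absurd hA (by simp)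
    rw [if_neg hl1] at hA
    by_cases hp : checkPal l = true
    · exact pal_good (by omega) ((checkPal_iff l).mp hp).2
    rw [if_neg hp] at hA
    obtain ⟨⟨i, hi⟩, -, hrec⟩ := List.any_eq_true.mp hA
    have hi' : i < l.length - 1 := List.mem_range.mp hi
    have hil : i + 1 < l.length := by omega
    obtain ⟨a, b, ha1, hab, hb, hsum⟩ :=
      ih (l.length - 1) (by omega) (mergeAt l i) (length_mergeAt _ _ hil) (by omega) hrec
    rw [length_mergeAt _ _ hil] at hb
    refine ⟨if a ≤ i then a else a + 1, if b ≤ i then b else b + 1,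
      by split_ifs <;> omega, by split_ifs <;> omega, by split_ifs <;> omega, ?_⟩
    have hpa : psum l (if a ≤ i then a else a + 1) = psum (mergeAt l i) a := by
      split_ifs with h
      · exact (psum_mergeAt_le a h hil).symm
      · exact (psum_mergeAt_gt a (by omega) hil).symm
    have hpb : psum l (if b ≤ i then b else b + 1) = psum (mergeAt l i) b := by
      split_ifs with h
      · exact (psum_mergeAt_le b h hil).symm
      · exact (psum_mergeAt_gt b (by omega) hil).symm
    rw [hpa, hpb, hsum, sum_mergeAt hil]

theorem charA_mpr : ∀ n (l : List Int), l.length = n → GoodP l →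
    checkAddPal l false = true := by
  intro n
  induction n using Nat.strong_induction_on with
  | _ n ih =>
    intro l hlen hG
    obtain ⟨a, b, ha1, hab, hb, hsum⟩ := hG
    have hlen2 : 2 ≤ l.length := by omega
    rw [checkAddPal_false_eq, if_neg (by omega)]
    by_cases hp : checkPal l = true
    · rw [if_pos hp]
    rw [if_neg hp]
    have hnotpal : ¬ (l = l.reverse) := fun he => hp ((checkPal_iff l).mpr ⟨by omega, he⟩)
    have hspare : l.length = 2 ∨ (l.length = 3 ∧ a = 1 ∧ b = 2) ∨
        (∃ t, 1 ≤ t ∧ t + 1 ≤ l.length ∧ t ≠ a ∧ t ≠ b) := by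
      by_cases h2 : l.length = 2
      · exact Or.inl h2
      by_cases h3 : l.length = 3
      · by_cases hab' : a = b
        · refine Or.inr (Or.inr ⟨if a = 1 then 2 else 1, ?_, ?_, ?_, ?_⟩) <;> split_ifs <;> omega
        · exact Or.inr (Or.inl ⟨h3, by omega, by omega⟩)
      · refine Or.inr (Or.inr ?_)
        by_cases hA1 : a = 1 ∨ b = 1
        · by_cases hA2 : a = 2 ∨ b = 2
          · exact ⟨3, by omega, by omega, by omega, by omega⟩
          · exact ⟨2, by omega, by omega, by omega, by omega⟩
        · exact ⟨1, by omega, by omega, by omega, by omega⟩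
    rcases hspare with h2 | ⟨h3, ha, hb'⟩ | ⟨t, ht1, htlen, hta, htb⟩
    · -- length 2: the pair forces l = [x,x], a palindrome — contradiction with hp
      match l, h2 with
      | [x, y], _ =>
        have hax : a = 1 := by omega
        have hbx : b = 1 := by omega
        subst hax; subst hbx
        simp [psum] at hsum
        exact absurd (by simp [hsum] : [x, y] = [x, y].reverse) hnotpal
    · -- length 3 with a = 1, b = 2 forces l = [x,y,x] — contradiction with hp
      match l, h3 with
      | [x, y, z], _ =>
        subst ha; subst hb'
        simp [psum] at hsum
        exact absurd (by simp; omega : [x, y, z] = [x, y, z].reverse) hnotpal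
    · -- merge away the spare index t and recurse
      apply List.any_eq_true.mpr
      have hil : (t - 1) + 1 < l.length := by omega
      refine ⟨⟨t - 1, List.mem_range.mpr (by omega)⟩, List.mem_attach _ _, ?_⟩
      apply ih (l.length - 1) (by omega) _ (length_mergeAt _ _ hil)
      refine ⟨if a < t then a else a - 1, if b < t then b else b - 1,
        by split_ifs <;> omega, by split_ifs <;> omega,
        by rw [length_mergeAt _ _ hil]; split_ifs <;> omega, ?_⟩
      have hpa : psum (mergeAt l (t - 1)) (if a < t then a else a - 1) = psum l a := by
        split_ifs with h
        · exact psum_mergeAt_le a (by omega) hil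
        · rw [psum_mergeAt_gt (a - 1) (by omega) hil, show a - 1 + 1 = a by omega]
      have hpb : psum (mergeAt l (t - 1)) (if b < t then b else b - 1) = psum l b := by
        split_ifs with h
        · exact psum_mergeAt_le b (by omega) hil
        · rw [psum_mergeAt_gt (b - 1) (by omega) hil, show b - 1 + 1 = b by omega]
      rw [hpa, hpb, hsum, sum_mergeAt hil]

def GoodB (l : List Int) : Bool :=
  (List.range (l.length + 1)).any fun a => (List.range (l.length + 1)).any fun b =>
    decide (1 ≤ a) && decide (a ≤ b) && decide (b + 1 ≤ l.length) &&
      decide (psum l a + psum l b = l.sum)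

theorem GoodB_iff (l : List Int) : GoodB l = true ↔ GoodP l := by
  simp only [GoodB, List.any_eq_true, List.mem_range, Bool.and_eq_true, decide_eq_true_eq]
  constructor
  · rintro ⟨a, ha, b, hb, ⟨⟨h1, h2⟩, h3⟩, h4⟩; exact ⟨a, b, h1, h2, h3, h4⟩
  · rintro ⟨a, b, h1, h2, h3, h4⟩; exact ⟨a, by omega, b, by omega, ⟨⟨h1, h2⟩, h3⟩, h4⟩

theorem GoodB_false_of_short {l : List Int} (h : l.length < 2) : GoodB l = false := by
  rw [Bool.eq_false_iff]
  intro hT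
  obtain ⟨a, b, h1, h2, h3, -⟩ := (GoodB_iff l).mp hT
  omega

def psList (p : List Int) : List Int := (List.range (p.length + 1)).map (psum p)

theorem psList_nil : psList [] = [0] := by simp [psList, psum]

theorem psList_last (p : List Int) : PySem.List.pyGet? (psList p) (-1) = some p.sum := by
  rw [psList, show p.length + 1 = p.length + 1 from rfl, List.range_succ, List.map_append]
  simp [PySem.List.pyGet?_neg_one_append_singleton, psum_full]

theorem length_psList (p : List Int) : (psList p).length = p.length + 1 := by simp [psList]

theorem psList_append (p : List Int) (x : Int) :
    psList (p ++ [x]) = psList p ++ [p.sum + x] := by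
  rw [psList, show (p ++ [x]).length = p.length + 1 by simp, List.range_succ, List.map_append]
  congr 1
  · rw [psList]
    apply List.map_congr_left
    intro k hk
    exact psum_append_of_le _ (by have := List.mem_range.mp hk; omega)
  · simp only [List.map_cons, List.map_nil]
    rw [psum_of_le_length (by simp)]
    simp

theorem psList_drop_one (p : List Int) :
    (psList p).drop 1 = (List.range p.length).map fun k => psum p (k + 1) := by
  rw [psList, List.range_succ_eq_map]
  simp [Function.comp_def]

def PairInv (p : List Int) (S : PySem.Set Int) : Prop :=
  ∀ c : Int, c ∈ S ↔ ∃ a b : Nat, 1 ≤ a ∧ a ≤ b ∧ b + 1 ≤ p.length ∧ psum p a + psum p b = c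

theorem Inv_empty : PairInv [] PySem.Set.empty := by
  intro c
  constructor
  · intro h; exact absurd h (by simp [PySem.Set.empty])
  · rintro ⟨a, b, h1, h2, h3, -⟩; simp only [List.length_nil] at h3; omega

theorem Inv_step {p : List Int} {S : PySem.Set Int} (x : Int) (hInv : PairInv p S) :
    PairInv (p ++ [x])
      (if 2 ≤ (psList p).length then
        ((psList p).drop 1).foldl (fun s b => PySem.Set.add s (p.sum + b)) S
      else S) := by
  intro c
  rw [length_psList]
  by_cases hp : 1 ≤ p.length
  · rw [if_pos (by omega)]
    rw [PySem.Set.mem_foldl_add, hInv c]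
    constructor
    · rintro (⟨a, b, h1, h2, h3, h4⟩ | ⟨b, hbmem, hc⟩)
      · exact ⟨a, b, h1, h2, by simp; omega,
          by rw [psum_append_of_le _ (by omega), psum_append_of_le _ (by omega)]; exact h4⟩
      · rw [psList_drop_one] at hbmem
        obtain ⟨k, hk, rfl⟩ := List.mem_map.mp hbmem
        have hk' := List.mem_range.mp hk
        refine ⟨k + 1, p.length, by omega, by omega, by simp, ?_⟩
        rw [psum_append_of_le _ (by omega), psum_append_of_le _ (by omega), psum_full, hc]
        ring
    · rintro ⟨a, b, h1, h2, h3, h4⟩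
      simp only [List.length_append, List.length_cons, List.length_nil] at h3
      by_cases hb : b + 1 ≤ p.length
      · refine Or.inl ⟨a, b, h1, h2, hb, ?_⟩
        rw [psum_append_of_le _ (by omega), psum_append_of_le _ (by omega)] at h4
        exact h4
      · have hbp : b = p.length := by omega
        refine Or.inr ⟨psum p a, ?_, ?_⟩
        · rw [psList_drop_one]
          exact List.mem_map.mpr ⟨a - 1, List.mem_range.mpr (by omega),
            by rw [show a - 1 + 1 = a by omega]⟩
        · rw [hbp, psum_append_of_le _ (by omega), psum_append_of_le _ (le_refl _),
            psum_full] at h4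
          rw [← h4]; ring
  · rw [if_neg (by omega)]
    rw [hInv c]
    constructor
    · rintro ⟨a, b, h1, h2, h3, -⟩; exact absurd h3 (by omega)
    · rintro ⟨a, b, h1, h2, h3, -⟩
      simp only [List.length_append, List.length_cons, List.length_nil] at h3
      exact absurd h3 (by omega)

theorem bStep_eq {p : List Int} {S : PySem.Set Int} (ans x : Int) (hInv : PairInv p S) :
    ∃ S', bStep (psList p, S, ans) x =
        (psList (p ++ [x]), S', if GoodB (p ++ [x]) then ans + 1 else ans) ∧
      PairInv (p ++ [x]) S' := by
  have hlast : (PySem.List.pyGet? (psList p) (-1)).getD 0 = p.sum := by rw [psList_last]; rfl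
  refine ⟨_, ?_, Inv_step x hInv⟩
  simp only [bStep, hlast]
  rw [← psList_append]
  congr 1
  congr 1
  -- remaining: the ans component
  have hInv' := Inv_step x hInv
  have hiff : (3 ≤ (psList (p ++ [x])).length ∧ p.sum + x ∈
      (if 2 ≤ (psList p).length then
        ((psList p).drop 1).foldl (fun s b => PySem.Set.add s (p.sum + b)) S
      else S)) ↔ GoodP (p ++ [x]) := by
    rw [length_psList, hInv' (p.sum + x)]
    constructor
    · rintro ⟨-, a, b, h1, h2, h3, h4⟩
      refine ⟨a, b, h1, h2, h3, ?_⟩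
      rw [h4]; simp
    · rintro ⟨a, b, h1, h2, h3, h4⟩
      simp only [List.length_append, List.length_cons, List.length_nil] at h3
      exact ⟨by simp; omega, a, b, h1, h2, by simp; omega, by rw [h4]; simp⟩
  by_cases hg : GoodP (p ++ [x])
  · rw [if_pos (hiff.mpr hg), if_pos ((GoodB_iff _).mpr hg)]
  · rw [if_neg (fun hc => hg (hiff.mp hc)),
      if_neg (fun hc => hg ((GoodB_iff _).mp hc))]

theorem charA_eq (t : List Int) (h : 1 ≤ t.length) : checkAddPal t false = GoodB t := by
  by_cases hg : GoodP t
  · rw [charA_mpr t.length t rfl hg, (GoodB_iff t).mpr hg]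
  · have h1 : checkAddPal t false ≠ true := fun hc => hg (charA_mp t.length t rfl (by omega) hc)
    have h2 : GoodB t ≠ true := fun hc => hg ((GoodB_iff t).mp hc)
    rw [Bool.eq_false_iff.mpr h1, Bool.eq_false_iff.mpr h2]

theorem innerFold : ∀ (rest p : List Int) (S : PySem.Set Int) (ans : Int), PairInv p S →
    (rest.foldl bStep (psList p, S, ans)).2.2 =
      ans + ((List.range rest.length).countP
        (fun k => GoodB ((p ++ rest).take (p.length + 1 + k))) : Int) := by
  intro rest
  induction rest with
  | nil => intro p S ans _; simp
  | cons x rest' ih =>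
    intro p S ans h
    rw [List.foldl_cons]
    obtain ⟨S', hEq, hInv'⟩ := bStep_eq ans x h
    rw [hEq, ih (p ++ [x]) S' _ hInv']
    rw [List.length_cons, List.range_succ_eq_map, List.countP_cons, List.countP_map]
    have hidx : ∀ k : Nat, p.length + 1 + (k + 1) = (p ++ [x]).length + 1 + k := by
      intro k; simp; omega
    have happ : p ++ x :: rest' = (p ++ [x]) ++ rest' := by simp
    have htake : (p ++ x :: rest').take (p.length + 1) = p ++ [x] := by
      rw [happ, List.take_left' (by simp)]
    rw [htake]
    have hfn : ((fun k => GoodB ((p ++ x :: rest').take (p.length + 1 + k))) ∘ Nat.succ)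
        = fun k => GoodB (((p ++ [x]) ++ rest').take ((p ++ [x]).length + 1 + k)) := by
      funext k
      simp only [Function.comp_apply, Nat.succ_eq_add_one, hidx k, happ]
    rw [hfn]
    split_ifs <;> push_cast <;> ring

theorem solution_alt_sum (arr : List Int) :
    solution_alt arr = ((List.range arr.length).map (fun i =>
      (((List.range (arr.length - i)).countP fun k => GoodB ((arr.drop i).take (1 + k))) : Int))).sum := by
  rw [solution_alt]
  have hbody : ∀ (ans : Int) (i : Nat),
      ((arr.drop i).foldl bStep ([0], PySem.Set.empty, ans)).2.2 =
        ans + (((List.range (arr.length - i)).countP fun k => GoodB ((arr.drop i).take (1 + k))) : Int) := by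
    intro ans i
    have h := innerFold (arr.drop i) [] PySem.Set.empty ans Inv_empty
    rw [psList_nil] at h
    simpa using h
  rw [show (fun (ans : Int) (i : Nat) =>
        ((arr.drop i).foldl bStep ([0], PySem.Set.empty, ans)).2.2)
      = fun ans i =>
        ans + (((List.range (arr.length - i)).countP fun k => GoodB ((arr.drop i).take (1 + k))) : Int)
    from funext fun ans => funext fun i => hbody ans i]
  rw [PySem.List.foldl_add]
  simp

theorem solution_sum (arr : List Int) :
    solution arr = ((List.range (arr.length - 1)).map (fun i =>
      (((List.range (arr.length - 1 - i)).countP fun m => GoodB ((arr.drop i).take (m + 2))) : Int))).sum := by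
  rw [solution]
  rw [show (fun (answer : Int) (i : Int) =>
        (PySem.List.pyRange (i + 2) ((arr.length : Int) + 1) 1).foldl (fun answer j =>
          if checkAddPal (PySem.List.slice arr (some i) (some j)) false then answer + 1
          else answer) answer)
      = fun answer i => answer +
        (((PySem.List.pyRange (i + 2) ((arr.length : Int) + 1) 1).countP
          fun j => checkAddPal (PySem.List.slice arr (some i) (some j)) false) : Int)
    from funext fun answer => funext fun i =>
      PySem.List.foldl_if_add_one (fun j => checkAddPal (PySem.List.slice arr (some i) (some j)) false)
        (PySem.List.pyRange (i + 2) ((arr.length : Int) + 1) 1) answer]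
  rw [PySem.List.foldl_add]
  rw [PySem.List.pyRange_one, List.map_map]
  have hN : ((arr.length : Int) - 1 - 0).toNat = arr.length - 1 := by omega
  rw [hN]
  rw [zero_add]
  apply congrArg List.sum
  apply List.map_congr_left
  intro k hk
  have hk' : k < arr.length - 1 := List.mem_range.mp hk
  simp only [Function.comp_apply]
  rw [PySem.List.pyRange_one]
  have hM : ((arr.length : Int) + 1 - ((0 + (k : Int)) + 2)).toNat = arr.length - 1 - k := by omega
  rw [hM, List.countP_map]
  apply congrArg Int.ofNat
  apply List.countP_congr
  intro m hm
  have hm' : m < arr.length - 1 - k := List.mem_range.mp hm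
  simp only [Function.comp_apply]
  have hb : (0 : Int) + (k : Int) + 2 + (m : Int) = (k : Int) + ((2 + m : Nat) : Int) := by
    push_cast; ring
  have ha : (0 : Int) + (k : Int) = (k : Int) := by ring
  rw [hb, ha, PySem.List.slice_natCast_add]
  rw [charA_eq _ (by simp; omega)]
  rw [show 2 + m = m + 2 by omega]

theorem count_shift (t : List Int) (h : 1 ≤ t.length) :
    (List.range t.length).countP (fun k => GoodB (t.take (1 + k)))
      = (List.range (t.length - 1)).countP (fun m => GoodB (t.take (m + 2))) := by
  conv_lhs => rw [show t.length = (t.length - 1) + 1 by omega]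
  rw [List.range_succ_eq_map, List.countP_cons, List.countP_map]
  have h0 : GoodB (t.take (1 + 0)) = false :=
    GoodB_false_of_short (by simp)
  rw [h0]
  simp only [Bool.false_eq_true, if_false]
  have : ((fun k => GoodB (t.take (1 + k))) ∘ Nat.succ) = fun m => GoodB (t.take (m + 2)) := by
    funext m
    simp only [Function.comp_apply, Nat.succ_eq_add_one]
    rw [show 1 + (m + 1) = m + 2 by omega]
  rw [this]
  omega

theorem solution_eq (arr : List Int) : solution arr = solution_alt arr := by
  rw [solution_sum, solution_alt_sum]
  rcases Nat.eq_zero_or_pos arr.length with h | h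
  · simp [h]
  · conv_rhs => rw [show arr.length = (arr.length - 1) + 1 by omega, List.range_succ]
    rw [List.map_append, List.sum_append]
    have hlast : (List.map (fun i =>
        (((List.range (arr.length - 1 + 1 - i)).countP
          fun k => GoodB ((arr.drop i).take (1 + k))) : Int)) [arr.length - 1]).sum = 0 := by
      simp only [List.map_cons, List.map_nil, List.sum_cons, List.sum_nil, add_zero]
      rw [show arr.length - 1 + 1 - (arr.length - 1) = 1 by omega]
      rw [show List.range 1 = [0] from rfl, List.countP_cons, List.countP_nil]
      rw [GoodB_false_of_short (by simp)]
      simp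
    rw [hlast, add_zero]
    apply congrArg List.sum
    apply List.map_congr_left
    intro i hi
    have hi' : i < arr.length - 1 := List.mem_range.mp hi
    have ht : (arr.drop i).length = arr.length - i := by simp
    have hcs := count_shift (arr.drop i) (by omega)
    rw [ht, show arr.length - i - 1 = arr.length - 1 - i by omega] at hcs
    rw [show arr.length - 1 + 1 - i = arr.length - i by omega, hcs]

-- ===== VERDICT (by name: the statement is the Claim_ definition above) =====
theorem solution_spec : Claim_equal_solution := by
  intro arr _
  unfold Spec_solution
  exact solution_eq arr
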